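-- pv_equiv track=rewrite | github.com/iamsamiofficial/Codeforces | maths/71.C. Left and Right Houses.py | solve
-- ===== SOURCE A (Python) =====
-- def solve(n, a):
--     # Compute prefix sums for zeros and ones
--     zeros_prefix_sum = [0] * (n + 1)
--     ones_prefix_sum = [0] * (n + 1)
--
--     for i in range(1, n + 1):
--         zeros_prefix_sum[i] = zeros_prefix_sum[i - 1] + (a[i - 1] == '0')
--         ones_prefix_sum[i] = ones_prefix_sum[i - 1] + (a[i - 1] == '1')
--
--     # Initialize variables to record the best position and its distance to the middle
--     best_position = 0
--     min_distance = float('inf')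
--
--     # Iterate through each possible position for the road
--     for i in range(1,n + 1):
--         # Calculate the number of satisfied residents on the left and right sides
--         satisfied_left = zeros_prefix_sum[i]
--         satisfied_right = ones_prefix_sum[n] - ones_prefix_sum[i]
--
--         # Check if the conditions are satisfied for both sides
--         if satisfied_left >= (i + 1) // 2 and satisfied_right >= (n - i + 1) // 2:
--             # Calculate the distance to the middle
--             distance = abs(n // 2 - i)
--
--             # Update the best position if the current one is closer to the middle
--             if distance < min_distance:
--                 min_distance = distance
--                 best_position = i
--
--     return best_position
-- ===== SOURCE B (Python) =====
-- def solve(n, a):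
--     if n < 1:
--         return 0
--     # single prefix pass: zo[i] = (#zeros, #ones) among the first i houses
--     zo = [(0, 0)]
--     for c in a[:n]:
--         z, o = zo[-1]
--         zo.append((z + (c == '0'), o + (c == '1')))
--     total_ones = zo[n][1]
--     m = n // 2
--
--     def ok(i):
--         z, o = zo[i]
--         return z >= (i + 1) // 2 and total_ones - o >= (n - i + 1) // 2
--
--     # search outward from the middle; at equal distance the left candidate wins
--     for d in range(n + 1):
--         i = m - d
--         if 1 <= i <= n and ok(i):
--             return i
--         if d:
--             i = m + d
--             if 1 <= i <= n and ok(i):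
--                 return i
--     return 0
-- ===== Notes on version B (the rewrite author's own statement) =====
-- stated objective: alternative
-- what changed: B keeps one (zeros,ones) prefix-pair pass and then searches outward from the middle m = n//2 (testing m-d before m+d) returning at the first qualifying position, instead of A's full ascending scan that tracks the best position and its distance to the middle.
import Mathlib
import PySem

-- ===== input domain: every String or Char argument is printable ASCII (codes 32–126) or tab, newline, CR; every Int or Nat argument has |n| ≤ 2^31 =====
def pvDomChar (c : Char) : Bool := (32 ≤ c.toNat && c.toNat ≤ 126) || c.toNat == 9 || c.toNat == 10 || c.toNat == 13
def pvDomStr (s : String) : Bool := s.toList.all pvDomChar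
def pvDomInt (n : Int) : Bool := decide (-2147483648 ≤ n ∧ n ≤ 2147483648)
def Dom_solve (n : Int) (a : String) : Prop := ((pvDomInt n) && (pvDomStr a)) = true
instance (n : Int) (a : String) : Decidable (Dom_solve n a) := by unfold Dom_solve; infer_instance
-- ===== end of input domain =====

-- B replaces A's full ascending scan that tracks the best distance by an outward search
-- from the middle that returns at the first qualifying road position (alternative decomposition).

-- ===== PORT A =====
def solve (n : Int) (a : String) : Int :=
  -- prefix sums, built by the loop 'for i in range(1, n+1)'
  let pr := (PySem.List.pyRange 1 (n + 1) 1).foldl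
    (fun (p : List Int × List Int) i =>
      let c := (PySem.Str.pyGet? a (i - 1)).getD ' '
      (p.1 ++ [PySem.List.pyGetD p.1 (i - 1) 0 + (if c = '0' then 1 else 0)],
       p.2 ++ [PySem.List.pyGetD p.2 (i - 1) 0 + (if c = '1' then 1 else 0)]))
    ([0], [0])
  -- best_position / min_distance loop; 'none' plays float('inf')
  let st := (PySem.List.pyRange 1 (n + 1) 1).foldl
    (fun (st : Int × Option Int) i =>
      let satL := PySem.List.pyGetD pr.1 i 0
      let satR := PySem.List.pyGetD pr.2 n 0 - PySem.List.pyGetD pr.2 i 0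
      if satL ≥ PySem.Int.floordiv (i + 1) 2 ∧ satR ≥ PySem.Int.floordiv (n - i + 1) 2 then
        let dist := |PySem.Int.floordiv n 2 - i|
        match st.2 with
        | none => (i, some dist)
        | some md => if dist < md then (i, some dist) else st
      else st)
    (0, none)
  st.1

-- ===== PORT B =====
-- the 'for d in range(n+1): … return i' loop of Source B
def solveAltGo (n m : Int) (ok : Int → Bool) : List Int → Int
  | [] => 0
  | d :: ds =>
    if 1 ≤ m - d ∧ m - d ≤ n ∧ ok (m - d) = true then m - d
    else if d ≠ 0 ∧ 1 ≤ m + d ∧ m + d ≤ n ∧ ok (m + d) = true then m + d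
    else solveAltGo n m ok ds

def solve_alt (n : Int) (a : String) : Int :=
  if n < 1 then 0
  else
    -- single pass over a[:n] building (zeros, ones) prefix pairs
    let zo := (PySem.Str.slice a none (some n)).toList.foldl
      (fun (zo : List (Int × Int)) c =>
        let p := PySem.List.pyGetD zo (-1) (0, 0)
        zo ++ [(p.1 + (if c = '0' then 1 else 0), p.2 + (if c = '1' then 1 else 0))])
      [(0, 0)]
    let totalOnes := (PySem.List.pyGetD zo n (0, 0)).2
    let m := PySem.Int.floordiv n 2
    let ok := fun (i : Int) =>
      let p := PySem.List.pyGetD zo i (0, 0)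
      decide (p.1 ≥ PySem.Int.floordiv (i + 1) 2 ∧
              totalOnes - p.2 ≥ PySem.Int.floordiv (n - i + 1) 2)
    solveAltGo n m ok (PySem.List.pyRange 0 (n + 1) 1)

-- ===== PRECONDITION & SPEC =====
-- Pre_ excludes only the inputs where A raises IndexError: 1 ≤ n but the string has fewer than n characters.
def Pre_solve (n : Int) (a : String) : Prop := n ≤ PySem.Str.len a ∨ n ≤ 0
instance (n : Int) (a : String) : Decidable (Pre_solve n a) := by unfold Pre_solve; infer_instance

def pvWitness_solve : Int × String := (5, "01101")

def Spec_solve (n : Int) (a : String) (out : Int) : Prop := out = solve_alt n a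
instance (n : Int) (a : String) (out : Int) : Decidable (Spec_solve n a out) := by unfold Spec_solve; infer_instance

-- ===== CLAIM (what is proved, stated in full; the proofs are below) =====
def Claim_equal_solve : Prop := ∀ (n : Int) (a : String), Dom_solve n a → Pre_solve n a → Spec_solve n a (solve n a)

-- ===== LEMMAS AND PROOFS =====

-- number of '0' (resp. '1') among the first j characters
def zcnt (cs : List Char) (j : Nat) : Int := ((cs.take j).countP (fun c => decide (c = '0')) : Nat)
def ocnt (cs : List Char) (j : Nat) : Int := ((cs.take j).countP (fun c => decide (c = '1')) : Nat)

-- the common qualifying condition on a road position i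
def Scond (n : Int) (cs : List Char) (i : Int) : Bool :=
  decide (zcnt cs i.toNat ≥ PySem.Int.floordiv (i + 1) 2 ∧
          ocnt cs n.toNat - ocnt cs i.toNat ≥ PySem.Int.floordiv (n - i + 1) 2)

-- A's loop body, abstracted over the condition S and the distance function D
def stepA (D : Int → Int) (S : Int → Bool) (st : Int × Option Int) (i : Int) : Int × Option Int :=
  if S i = true then
    match st.2 with
    | none => (i, some (D i))
    | some md => if D i < md then (i, some (D i)) else st
  else st

-- declarative description of the answer: 0 if nothing qualifies, else the unique
-- qualifying position minimal in D with smallest-index tie-break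
def SelP (n : Int) (D : Int → Int) (S : Int → Bool) (r : Int) : Prop :=
  (r = 0 ∧ ∀ i : Int, 1 ≤ i → i ≤ n → S i = false) ∨
  (1 ≤ r ∧ r ≤ n ∧ S r = true ∧
    ∀ i : Int, 1 ≤ i → i ≤ n → S i = true → (D r < D i ∨ (D r = D i ∧ r ≤ i)))

lemma SelP_unique {n : Int} {D : Int → Int} {S : Int → Bool} {r1 r2 : Int}
    (h1 : SelP n D S r1) (h2 : SelP n D S r2) : r1 = r2 := by
  rcases h1 with ⟨hr1, hall1⟩ | ⟨hb1, hb1', hS1, hmin1⟩ <;>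
    rcases h2 with ⟨hr2, hall2⟩ | ⟨hb2, hb2', hS2, hmin2⟩
  · omega
  · have := hall1 r2 hb2 hb2'; simp [this] at hS2
  · have := hall2 r1 hb1 hb1'; simp [this] at hS1
  · have c1 := hmin1 r2 hb2 hb2' hS2
    have c2 := hmin2 r1 hb1 hb1' hS1
    omega

-- invariant of A's selection loop after processing positions 1..j
def InvA (j : Int) (D : Int → Int) (S : Int → Bool) (st : Int × Option Int) : Prop :=
  (st = (0, none) ∧ ∀ i : Int, 1 ≤ i → i ≤ j → S i = false) ∨
  (1 ≤ st.1 ∧ st.1 ≤ j ∧ S st.1 = true ∧ st.2 = some (D st.1) ∧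
    ∀ i : Int, 1 ≤ i → i ≤ j → S i = true → (D st.1 < D i ∨ (D st.1 = D i ∧ st.1 ≤ i)))

lemma foldA_inv (D : Int → Int) (S : Int → Bool) :
    ∀ j : Nat, InvA (j : Int) D S
      ((PySem.List.pyRange 1 ((j : Int) + 1) 1).foldl (stepA D S) (0, none)) := by
  intro j
  induction j with
  | zero =>
    rw [PySem.List.pyRange_one_eq_nil (by omega)]
    exact Or.inl ⟨rfl, fun i h1 h2 => absurd h2 (by omega)⟩
  | succ k ih =>
    have hcast : (((k + 1 : Nat)) : Int) + 1 = ((k : Int) + 1) + 1 := by push_cast; ring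
    rw [hcast, PySem.List.pyRange_one_succ_right (by omega), List.foldl_append]
    set st := (PySem.List.pyRange 1 ((k : Int) + 1) 1).foldl (stepA D S) (0, none) with hst
    simp only [List.foldl_cons, List.foldl_nil]
    by_cases hS : S ((k : Int) + 1) = true
    · rcases ih with ⟨hval, hall⟩ | ⟨hb, hb', hSb, hsnd, hmin⟩
      · rw [hval]
        simp only [stepA, hS, if_true]
        refine Or.inr ⟨by omega, by push_cast; omega, hS, rfl, ?_⟩
        intro i h1 h2 hSi
        dsimp only
        rcases lt_or_ge i ((k : Int) + 1) with h | h
        · have := hall i h1 (by omega); simp [this] at hSi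
        · right; constructor
          · congr 1; omega
          · omega
      · simp only [stepA, hS, if_true, hsnd]
        by_cases hlt : D ((k : Int) + 1) < D st.1
        · rw [if_pos hlt]
          refine Or.inr ⟨by omega, by push_cast; omega, hS, rfl, ?_⟩
          intro i h1 h2 hSi
          dsimp only
          rcases lt_or_ge i ((k : Int) + 1) with h | h
          · rcases hmin i h1 (by omega) hSi with h' | ⟨h', _⟩
            · left; omega
            · left; omega
          · have : i = (k : Int) + 1 := by omega
            right; exact ⟨by rw [this], by omega⟩
        · rw [if_neg hlt]
          refine Or.inr ⟨hb, by push_cast; omega, hSb, hsnd, ?_⟩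
          intro i h1 h2 hSi

          rcases lt_or_ge i ((k : Int) + 1) with h | h
          · exact hmin i h1 (by omega) hSi
          · have hi : i = (k : Int) + 1 := by omega
            subst hi
            rcases lt_or_eq_of_le (not_lt.mp hlt) with h' | h'
            · left; exact h'
            · right; exact ⟨h', by omega⟩
    · simp only [stepA, if_neg hS]
      rcases ih with ⟨hval, hall⟩ | ⟨hb, hb', hSb, hsnd, hmin⟩
      · refine Or.inl ⟨hval, ?_⟩
        intro i h1 h2

        rcases lt_or_ge i ((k : Int) + 1) with h | h
        · exact hall i h1 (by omega)
        · have : i = (k : Int) + 1 := by omega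
          rw [this]; simpa using hS
      · refine Or.inr ⟨hb, by push_cast; omega, hSb, hsnd, ?_⟩
        intro i h1 h2 hSi

        rcases lt_or_ge i ((k : Int) + 1) with h | h
        · exact hmin i h1 (by omega) hSi
        · have : i = (k : Int) + 1 := by omega
          rw [this] at hSi; simp [hSi] at hS

lemma InvA_sel {n : Int} {D : Int → Int} {S : Int → Bool} {st : Int × Option Int}
    (h : InvA n D S st) : SelP n D S st.1 := by
  rcases h with ⟨hval, hall⟩ | ⟨hb, hb', hSb, _, hmin⟩
  · exact Or.inl ⟨by rw [hval], hall⟩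
  · exact Or.inr ⟨hb, hb', hSb, hmin⟩

-- B's outward search returns the declarative answer
lemma solveAltGo_congr (n m : Int) (ok ok' : Int → Bool)
    (h : ∀ i : Int, 1 ≤ i → i ≤ n → ok i = ok' i) :
    ∀ l : List Int, solveAltGo n m ok l = solveAltGo n m ok' l := by
  intro l
  induction l with
  | nil => rfl
  | cons d ds ih =>
    simp only [solveAltGo]
    by_cases h1 : 1 ≤ m - d ∧ m - d ≤ n
    · rw [h (m - d) h1.1 h1.2]
      by_cases h2 : 1 ≤ m + d ∧ m + d ≤ n
      · rw [h (m + d) h2.1 h2.2, ih]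
      · have e1 : (d ≠ 0 ∧ 1 ≤ m + d ∧ m + d ≤ n ∧ ok (m + d) = true) ↔ False := by tauto
        have e2 : (d ≠ 0 ∧ 1 ≤ m + d ∧ m + d ≤ n ∧ ok' (m + d) = true) ↔ False := by tauto
        simp only [e1, e2, ih]
    · have e1 : (1 ≤ m - d ∧ m - d ≤ n ∧ ok (m - d) = true) ↔ False := by tauto
      have e1' : (1 ≤ m - d ∧ m - d ≤ n ∧ ok' (m - d) = true) ↔ False := by tauto
      by_cases h2 : 1 ≤ m + d ∧ m + d ≤ n
      · rw [h (m + d) h2.1 h2.2]; simp only [e1, e1', ih]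
      · have e2 : (d ≠ 0 ∧ 1 ≤ m + d ∧ m + d ≤ n ∧ ok (m + d) = true) ↔ False := by tauto
        have e2' : (d ≠ 0 ∧ 1 ≤ m + d ∧ m + d ≤ n ∧ ok' (m + d) = true) ↔ False := by tauto
        simp only [e1, e1', e2, e2', ih]

lemma solveAltGo_sel (n m : Int) (S : Int → Bool) (hm0 : 0 ≤ m) (hmn : m ≤ n) :
    ∀ (t : Nat) (d0 : Int), 0 ≤ d0 → d0 + t = n + 1 →
      (∀ i : Int, 1 ≤ i → i ≤ n → S i = true → d0 ≤ |m - i|) →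
      SelP n (fun i => |m - i|) S (solveAltGo n m S (PySem.List.pyRange d0 (n + 1) 1)) := by
  intro t
  induction t with
  | zero =>
    intro d0 hd0 hsum hprev
    rw [PySem.List.pyRange_one_eq_nil (by omega)]
    refine Or.inl ⟨rfl, ?_⟩
    intro i h1 h2

    by_contra hSi
    rw [Bool.not_eq_false] at hSi
    have habs := hprev i h1 h2 hSi
    have : |m - i| ≤ n := abs_le.mpr ⟨by omega, by omega⟩
    omega
  | succ t ih =>
    intro d0 hd0 hsum hprev
    rw [PySem.List.pyRange_one_cons (by omega)]
    simp only [solveAltGo]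
    by_cases hc1 : 1 ≤ m - d0 ∧ m - d0 ≤ n ∧ S (m - d0) = true
    · rw [if_pos hc1]
      refine Or.inr ⟨hc1.1, hc1.2.1, hc1.2.2, ?_⟩
      intro i h1 h2 hSi
      dsimp only
      have hge := hprev i h1 h2 hSi
      have hdr : |m - (m - d0)| = d0 := by
        rw [show m - (m - d0) = d0 by ring, abs_of_nonneg hd0]
      rcases lt_or_eq_of_le hge with h | h
      · left; omega
      · right
        refine ⟨by omega, ?_⟩
        rcases (abs_eq hd0).mp h.symm with h' | h' <;> omega
    · rw [if_neg hc1]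
      by_cases hc2 : d0 ≠ 0 ∧ 1 ≤ m + d0 ∧ m + d0 ≤ n ∧ S (m + d0) = true
      · rw [if_pos hc2]
        refine Or.inr ⟨hc2.2.1, hc2.2.2.1, hc2.2.2.2, ?_⟩
        intro i h1 h2 hSi
        dsimp only
        have hge := hprev i h1 h2 hSi
        have hdr : |m - (m + d0)| = d0 := by
          rw [show m - (m + d0) = -d0 by ring, abs_neg, abs_of_nonneg hd0]
        rcases lt_or_eq_of_le hge with h | h
        · left; omega
        · rcases (abs_eq hd0).mp h.symm with h' | h'
          · exfalso; exact hc1 ⟨by omega, by omega, by rw [show m - d0 = i by omega]; exact hSi⟩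
          · right; omega
      · rw [if_neg hc2]
        refine ih (d0 + 1) (by omega) (by omega) ?_
        intro i h1 h2 hSi
        dsimp only
        have hge := hprev i h1 h2 hSi
        rcases lt_or_eq_of_le hge with h | h
        · omega
        · exfalso
          rcases (abs_eq hd0).mp h.symm with h' | h'
          · exact hc1 ⟨by omega, by omega, by rw [show m - d0 = i by omega]; exact hSi⟩
          · rcases eq_or_ne d0 0 with hz | hz
            · exact hc1 ⟨by omega, by omega, by rw [show m - d0 = i by omega]; exact hSi⟩
            · exact hc2 ⟨hz, by omega, by omega, by rw [show m + d0 = i by omega]; exact hSi⟩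

lemma zcnt_succ (cs : List Char) (k : Nat) (h : k < cs.length) :
    zcnt cs (k + 1) = zcnt cs k + (if cs[k] = '0' then 1 else 0) := by
  simp only [zcnt, List.take_succ_eq_append_getElem h, List.countP_append,
    List.countP_singleton]
  split_ifs with h' <;> simp_all

lemma ocnt_succ (cs : List Char) (k : Nat) (h : k < cs.length) :
    ocnt cs (k + 1) = ocnt cs k + (if cs[k] = '1' then 1 else 0) := by
  simp only [ocnt, List.take_succ_eq_append_getElem h, List.countP_append,
    List.countP_singleton]
  split_ifs with h' <;> simp_all

lemma zcnt_take (cs : List Char) (k j : Nat) (h : j ≤ k) :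
    zcnt (cs.take k) j = zcnt cs j := by
  simp [zcnt, List.take_take, Nat.min_eq_left h]

lemma ocnt_take (cs : List Char) (k j : Nat) (h : j ≤ k) :
    ocnt (cs.take k) j = ocnt cs j := by
  simp [ocnt, List.take_take, Nat.min_eq_left h]

-- A's prefix-sum loop builds exactly the tables of zcnt / ocnt values
lemma prefixA (a : String) :
    ∀ k : Nat, k ≤ a.toList.length →
    (PySem.List.pyRange 1 ((k : Int) + 1) 1).foldl
      (fun (p : List Int × List Int) i =>
        let c := (PySem.Str.pyGet? a (i - 1)).getD ' '
        (p.1 ++ [PySem.List.pyGetD p.1 (i - 1) 0 + (if c = '0' then 1 else 0)],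
         p.2 ++ [PySem.List.pyGetD p.2 (i - 1) 0 + (if c = '1' then 1 else 0)]))
      ([0], [0])
    = ((List.range (k + 1)).map (fun j => zcnt a.toList j),
       (List.range (k + 1)).map (fun j => ocnt a.toList j)) := by
  intro k
  induction k with
  | zero =>
    intro _
    rw [PySem.List.pyRange_one_eq_nil (by omega)]
    simp [zcnt, ocnt]
  | succ k ih =>
    intro hk
    have hcast : (((k + 1 : Nat)) : Int) + 1 = ((k : Int) + 1) + 1 := by push_cast; ring
    rw [hcast, PySem.List.pyRange_one_succ_right (by omega), List.foldl_append,
      ih (by omega)]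
    simp only [List.foldl_cons, List.foldl_nil]
    have hidx : ((k : Int) + 1) - 1 = ((k : Nat) : Int) := by ring
    have hklt : k < a.toList.length := by omega
    rw [hidx, PySem.Str.pyGet?_natCast, List.getElem?_eq_getElem hklt, Option.getD_some,
      PySem.List.pyGetD_natCast, PySem.List.pyGetD_natCast,
      PySem.List.getD_map_range _ _ _ _ (Nat.lt_succ_self k),
      PySem.List.getD_map_range _ _ _ _ (Nat.lt_succ_self k)]
    have hz : (List.range (k + 1 + 1)).map (fun j => zcnt a.toList j)
        = (List.range (k + 1)).map (fun j => zcnt a.toList j)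
          ++ [zcnt a.toList k + (if a.toList[k] = '0' then 1 else 0)] := by
      rw [List.range_succ, List.map_append, List.map_singleton, zcnt_succ a.toList k hklt]
    have ho : (List.range (k + 1 + 1)).map (fun j => ocnt a.toList j)
        = (List.range (k + 1)).map (fun j => ocnt a.toList j)
          ++ [ocnt a.toList k + (if a.toList[k] = '1' then 1 else 0)] := by
      rw [List.range_succ, List.map_append, List.map_singleton, ocnt_succ a.toList k hklt]
    rw [hz, ho]

lemma zcnt_append_le (ct : List Char) (c : Char) (j : Nat) (h : j ≤ ct.length) :
    zcnt (ct ++ [c]) j = zcnt ct j := by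
  simp [zcnt, List.take_append_of_le_length h]

lemma ocnt_append_le (ct : List Char) (c : Char) (j : Nat) (h : j ≤ ct.length) :
    ocnt (ct ++ [c]) j = ocnt ct j := by
  simp [ocnt, List.take_append_of_le_length h]

-- B's single pass over the characters builds the paired table
lemma prefixB :
    ∀ ct : List Char,
    ct.foldl
      (fun (zo : List (Int × Int)) c =>
        let p := PySem.List.pyGetD zo (-1) (0, 0)
        zo ++ [(p.1 + (if c = '0' then 1 else 0), p.2 + (if c = '1' then 1 else 0))])
      [(0, 0)]
    = (List.range (ct.length + 1)).map (fun j => (zcnt ct j, ocnt ct j)) := by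
  intro ct
  induction ct using List.reverseRecOn with
  | nil => simp [zcnt, ocnt]
  | append_singleton ct c ih =>
    rw [List.foldl_append, ih]
    simp only [List.foldl_cons, List.foldl_nil]
    have hsplit : (List.range (ct.length + 1)).map (fun j => ((zcnt ct j, ocnt ct j) : Int × Int))
        = (List.range ct.length).map (fun j => ((zcnt ct j, ocnt ct j) : Int × Int))
          ++ [(zcnt ct ct.length, ocnt ct ct.length)] := by
      rw [List.range_succ, List.map_append, List.map_singleton]
    have hlastget : PySem.List.pyGetD
        ((List.range (ct.length + 1)).map (fun j => ((zcnt ct j, ocnt ct j) : Int × Int)))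
        (-1) (0, 0) = (zcnt ct ct.length, ocnt ct ct.length) := by
      rw [hsplit]; exact PySem.List.pyGetD_neg_one_append_singleton _ _ _
    have hlen : (ct ++ [c]).length = ct.length + 1 := by simp
    have hr : (List.range ((ct ++ [c]).length + 1)).map
          (fun j => ((zcnt (ct ++ [c]) j, ocnt (ct ++ [c]) j) : Int × Int))
        = (List.range (ct.length + 1)).map (fun j => ((zcnt ct j, ocnt ct j) : Int × Int))
          ++ [(zcnt ct ct.length + (if c = '0' then 1 else 0),
               ocnt ct ct.length + (if c = '1' then 1 else 0))] := by
      rw [hlen, List.range_succ, List.map_append, List.map_singleton]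
      congr 1
      · exact List.map_congr_left (fun j hj => by
          rw [List.mem_range] at hj
          rw [zcnt_append_le ct c j (by omega), ocnt_append_le ct c j (by omega)])
      · rw [zcnt_succ (ct ++ [c]) ct.length (by simp),
            ocnt_succ (ct ++ [c]) ct.length (by simp),
            zcnt_append_le ct c ct.length le_rfl, ocnt_append_le ct c ct.length le_rfl]
        simp
    rw [hlastget, hr]

lemma solve_sel (n : Int) (a : String) (hn : 1 ≤ n) (hlen : n ≤ (a.toList.length : Int)) :
    SelP n (fun i => |PySem.Int.floordiv n 2 - i|) (Scond n a.toList) (solve n a) := by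
  have hkn : ((n.toNat : Nat) : Int) = n := by omega
  have hkl : n.toNat ≤ a.toList.length := by omega
  have hpr : (PySem.List.pyRange 1 (n + 1) 1).foldl
      (fun (p : List Int × List Int) i =>
        let c := (PySem.Str.pyGet? a (i - 1)).getD ' '
        (p.1 ++ [PySem.List.pyGetD p.1 (i - 1) 0 + (if c = '0' then 1 else 0)],
         p.2 ++ [PySem.List.pyGetD p.2 (i - 1) 0 + (if c = '1' then 1 else 0)]))
      ([0], [0])
      = ((List.range (n.toNat + 1)).map (fun j => zcnt a.toList j),
         (List.range (n.toNat + 1)).map (fun j => ocnt a.toList j)) := by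
    rw [← hkn]; exact prefixA a n.toNat hkl
  have hA : solve n a = ((PySem.List.pyRange 1 (n + 1) 1).foldl
      (stepA (fun i => |PySem.Int.floordiv n 2 - i|) (Scond n a.toList)) (0, none)).1 := by
    simp only [solve]
    rw [hpr]
    congr 1
    apply PySem.List.foldl_congr_mem
    intro acc i hi
    rcases PySem.List.mem_pyRange_one.mp hi with ⟨h1, h2⟩
    have h0i : 0 ≤ i := by omega
    have hlt : i.toNat < n.toNat + 1 := by omega
    dsimp only
    rw [PySem.List.pyGetD_of_nonneg _ _ h0i,
        PySem.List.getD_map_range _ _ _ _ hlt,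
        PySem.List.pyGetD_of_nonneg _ _ (by omega : (0 : Int) ≤ n),
        PySem.List.getD_map_range _ _ _ _ (Nat.lt_succ_self _),
        PySem.List.pyGetD_of_nonneg _ _ h0i,
        PySem.List.getD_map_range _ _ _ _ hlt]
    simp only [stepA, Scond, decide_eq_true_eq, ge_iff_le]
  rw [hA]
  have := InvA_sel (foldA_inv (fun i => |PySem.Int.floordiv n 2 - i|) (Scond n a.toList) n.toNat)
  rwa [hkn] at this

lemma solve_alt_sel (n : Int) (a : String) (hn : 1 ≤ n) (hlen : n ≤ (a.toList.length : Int)) :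
    SelP n (fun i => |PySem.Int.floordiv n 2 - i|) (Scond n a.toList) (solve_alt n a) := by
  have hkn : ((n.toNat : Nat) : Int) = n := by omega
  have hkl : n.toNat ≤ a.toList.length := by omega
  have hslice : (PySem.Str.slice a none (some n)).toList = a.toList.take n.toNat := by
    simp [PySem.Str.slice, PySem.List.slice_to _ (by omega : (0 : Int) ≤ n)]
  have htl : (a.toList.take n.toNat).length = n.toNat := by
    rw [List.length_take]; omega
  have hB : solve_alt n a = solveAltGo n (PySem.Int.floordiv n 2) (Scond n a.toList)
      (PySem.List.pyRange 0 (n + 1) 1) := by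
    simp only [solve_alt]
    rw [if_neg (by omega)]
    rw [hslice, prefixB (a.toList.take n.toNat), htl]
    rw [PySem.List.pyGetD_of_nonneg _ _ (by omega : (0 : Int) ≤ n),
        PySem.List.getD_map_range _ _ _ _ (Nat.lt_succ_self _)]
    apply solveAltGo_congr
    intro i h1 h2
    have h0i : 0 ≤ i := by omega
    have hlt : i.toNat < n.toNat + 1 := by omega
    rw [PySem.List.pyGetD_of_nonneg _ _ h0i, PySem.List.getD_map_range _ _ _ _ hlt]
    simp only [Scond, decide_eq_decide]
    rw [zcnt_take a.toList n.toNat i.toNat (by omega),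
        ocnt_take a.toList n.toNat i.toNat (by omega),
        ocnt_take a.toList n.toNat n.toNat le_rfl]
  rw [hB]
  have hfd : PySem.Int.floordiv n 2 = n / 2 := PySem.Int.floordiv_eq_ediv_of_pos (by norm_num)
  exact solveAltGo_sel n (PySem.Int.floordiv n 2) (Scond n a.toList)
    (by omega) (by omega) (n + 1).toNat 0 le_rfl (by omega)
    (fun i _ _ _ => abs_nonneg _)

-- ===== VERDICT (by name: the statement is the Claim_ definition above) =====
theorem solve_spec : Claim_equal_solve := by
  intro n a _ hpre
  unfold Spec_solve
  by_cases hn : n < 1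
  · have hr : PySem.List.pyRange 1 (n + 1) 1 = [] := PySem.List.pyRange_one_eq_nil (by omega)
    simp [solve, solve_alt, hr, hn]
  · have hn1 : 1 ≤ n := by omega
    have hlen : n ≤ (a.toList.length : Int) := by
      rcases hpre with h | h
      · simpa [PySem.Str.len_eq] using h
      · omega
    exact SelP_unique (solve_sel n a hn1 hlen) (solve_alt_sel n a hn1 hlen)
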